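-- pv_equiv track=rewrite | github.com/Konohayui/LeetCode | Coding Interview/Google/problem 42.py | get_subset_sum
-- ===== SOURCE A (Python) =====
-- def get_subset_sum(s, k):
--     if len(s) == 0:
--         return None
--
--     if s[0] == k:
--         return [s[0]]
--
--     has_element = get_subset_sum(s[1:], k - s[0])
--     if has_element:
--         return [s[0]] + has_element
--     else:
--         return get_subset_sum(s[1:], k)
-- ===== SOURCE B (Python) =====
-- def get_subset_sum(s, k):
--     # Memoized top-down search on (index, remaining target), include-first,
--     # indexing instead of A's repeated s[1:] slicing.
--     memo = {}
--     n = len(s)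
--
--     def f(i, r):
--         key = (i, r)
--         if key in memo:
--             return memo[key]
--         if i == n:
--             res = None
--         elif s[i] == r:
--             res = [s[i]]
--         else:
--             inc = f(i + 1, r - s[i])
--             if inc:
--                 res = [s[i]] + inc
--             else:
--                 res = f(i + 1, r)
--         memo[key] = res
--         return res
--
--     return f(0, k)
-- ===== Notes on version B (the rewrite author's own statement) =====
-- stated objective: alternative
-- what changed: Replaced A's plain include/exclude recursion with repeated s[1:] slicing by a top-down search memoized on (index, remaining target), which caches repeated states and indexes instead of copying suffixes.
import Mathlib
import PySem

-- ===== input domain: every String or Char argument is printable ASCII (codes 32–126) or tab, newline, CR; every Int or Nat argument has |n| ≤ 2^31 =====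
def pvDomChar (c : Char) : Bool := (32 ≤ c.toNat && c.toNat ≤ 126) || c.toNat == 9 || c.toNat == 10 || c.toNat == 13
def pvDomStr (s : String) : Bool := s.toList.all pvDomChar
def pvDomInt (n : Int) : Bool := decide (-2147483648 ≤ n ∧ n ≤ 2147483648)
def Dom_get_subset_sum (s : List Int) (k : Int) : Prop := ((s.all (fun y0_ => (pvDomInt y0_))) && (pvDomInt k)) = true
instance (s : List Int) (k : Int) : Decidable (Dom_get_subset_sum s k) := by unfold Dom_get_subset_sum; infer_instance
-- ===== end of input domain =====

-- B replaces A's plain include/exclude recursion (with s[1:] slicing) by a top-down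
-- search memoized on (index, remaining target); objective: alternative algorithm.

-- ===== PORT A =====
def get_subset_sum (s : List Int) (k : Int) : Option (List Int) :=
  match s with
  | [] => none
  | x :: rest =>
    if x == k then some [x]
    else
      -- 'if has_element:' is Python truthiness: none and some [] are falsy
      match get_subset_sum rest (k - x) with
      | some t => if t = [] then get_subset_sum rest k else some (x :: t)
      | none => get_subset_sum rest k

-- ===== PORT B =====
-- the inner 'f(i, r)' of Source B, threading the memo dict; fuel is only a
-- termination guard (fuel = len(s)+1 at the top call never runs out)
def pvF (s : List Int) : Nat → Int → Int → PySem.Dict (Int × Int) (Option (List Int)) →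
    Option (List Int) × PySem.Dict (Int × Int) (Option (List Int))
  | 0, _, _, memo => (none, memo)   -- unreachable under the top-level fuel
  | fuel + 1, i, r, memo =>
    match memo.get? (i, r) with
    | some v => (v, memo)
    | none =>
      if i == (s.length : Int) then
        (none, memo.insert (i, r) none)
      else
        match PySem.List.pyGet? s i with
        | none => (none, memo.insert (i, r) none)   -- IndexError: unreachable, 0 ≤ i < len(s)
        | some x =>
          if x == r then (some [x], memo.insert (i, r) (some [x]))
          else
            match pvF s fuel (i + 1) (r - x) memo with
            | (some t, m1) =>
              -- 'if inc:' is Python truthiness: None and [] are falsy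
              if t = [] then
                match pvF s fuel (i + 1) r m1 with
                | (res, m2) => (res, m2.insert (i, r) res)
              else (some (x :: t), m1.insert (i, r) (some (x :: t)))
            | (none, m1) =>
              match pvF s fuel (i + 1) r m1 with
              | (res, m2) => (res, m2.insert (i, r) res)

def get_subset_sum_alt (s : List Int) (k : Int) : Option (List Int) :=
  (pvF s (s.length + 1) 0 k PySem.Dict.empty).1

-- ===== PRECONDITION & SPEC =====
def Spec_get_subset_sum (s : List Int) (k : Int) (out : Option (List Int)) : Prop := out = get_subset_sum_alt s k
instance (s : List Int) (k : Int) (out : Option (List Int)) : Decidable (Spec_get_subset_sum s k out) := by unfold Spec_get_subset_sum; infer_instance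

-- ===== CLAIM (what is proved, stated in full; the proofs are below) =====
def Claim_equal_get_subset_sum : Prop := ∀ (s : List Int) (k : Int), Dom_get_subset_sum s k → Spec_get_subset_sum s k (get_subset_sum s k)

-- ===== LEMMAS AND PROOFS =====

-- A never returns the empty list
theorem get_subset_sum_ne_nil (s : List Int) (k : Int) (t : List Int)
    (h : get_subset_sum s k = some t) : t ≠ [] := by
  induction s generalizing k t with
  | nil => simp [get_subset_sum] at h
  | cons x rest ih =>
    rw [get_subset_sum] at h
    split at h
    · exact fun ht => by rw [ht] at h; simp at h
    · split at h
      · split at h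
        · exact ih _ _ h
        · exact fun ht => by rw [ht] at h; simp at h
      · exact ih _ _ h

-- the memo invariant: every stored entry is A's answer on the corresponding suffix
def pvGood (s : List Int) (memo : PySem.Dict (Int × Int) (Option (List Int))) : Prop :=
  ∀ (i r : Int) (v : Option (List Int)), 0 ≤ i →
    memo.get? (i, r) = some v → v = get_subset_sum (s.drop i.toNat) r

theorem pvGood_insert (s : List Int) (memo : PySem.Dict (Int × Int) (Option (List Int)))
    (i r : Int) (v : Option (List Int)) (hg : pvGood s memo) (hi : 0 ≤ i)
    (hv : v = get_subset_sum (s.drop i.toNat) r) :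
    pvGood s (memo.insert (i, r) v) := by
  intro j q w hj hw
  rw [PySem.Dict.get?_insert] at hw
  split at hw
  · rename_i h
    obtain ⟨h1, h2⟩ := Prod.mk.injEq .. ▸ h
    subst h1; subst h2
    cases hw; exact hv
  · exact hg j q w hj hw

-- main invariant: with enough fuel and a good memo, pvF computes A on the suffix
theorem pvF_correct (s : List Int) : ∀ (fuel : Nat) (i r : Int)
    (memo : PySem.Dict (Int × Int) (Option (List Int))),
    0 ≤ i → i ≤ (s.length : Int) → s.length - i.toNat < fuel → pvGood s memo →
    (pvF s fuel i r memo).1 = get_subset_sum (s.drop i.toNat) r ∧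
      pvGood s (pvF s fuel i r memo).2 := by
  intro fuel
  induction fuel with
  | zero => intro i r memo _ _ hf _; omega
  | succ fuel ih =>
    intro i r memo hi0 hin hf hg
    rw [pvF]
    cases hm : memo.get? (i, r) with
    | some v =>
      exact ⟨hg i r v hi0 hm, hg⟩
    | none =>
      by_cases hend : i = (s.length : Int)
      · have hendt : (i == (s.length : Int)) = true := by simp [hend]
        simp only [hendt, if_true]
        have hval : get_subset_sum (s.drop i.toNat) r = none := by
          have hnil : s.drop i.toNat = [] := List.drop_eq_nil_of_le (by omega)
          simp [hnil, get_subset_sum]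
        exact ⟨hval.symm, pvGood_insert s memo i r none hg hi0 hval.symm⟩
      · have hlt : i.toNat < s.length := by omega
        have hx : PySem.List.pyGet? s i = some s[i.toNat] := by
          apply PySem.List.pyGet?_eq_some_getElem <;> omega
        have hib : (i == (s.length : Int)) = false := by simp [hend]
        have hdrop : s.drop i.toNat = s[i.toNat] :: s.drop ((i + 1).toNat) := by
          have h1 : (i + 1).toNat = i.toNat + 1 := by omega
          rw [h1]; exact List.drop_eq_getElem_cons hlt
        have hAx : get_subset_sum (s.drop i.toNat) r =
            (if s[i.toNat] == r then some [s[i.toNat]]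
             else match get_subset_sum (s.drop ((i + 1).toNat)) (r - s[i.toNat]) with
               | some t => if t = [] then get_subset_sum (s.drop ((i + 1).toNat)) r
                           else some (s[i.toNat] :: t)
               | none => get_subset_sum (s.drop ((i + 1).toNat)) r) := by
          rw [hdrop, get_subset_sum]
        simp only [hib, Bool.false_eq_true, if_false, hx]
        by_cases hxr : s[i.toNat] = r
        · have hxrt : (s[i.toNat] == r) = true := by simp [hxr]
          simp only [hxrt, if_true]
          have hval : get_subset_sum (s.drop i.toNat) r = some [s[i.toNat]] := by
            rw [hAx]; simp [hxrt]
          exact ⟨hval.symm, pvGood_insert s memo i r (some [s[i.toNat]]) hg hi0 hval.symm⟩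
        · have hxrb : (s[i.toNat] == r) = false := by simp [hxr]
          simp only [hxrb, Bool.false_eq_true, if_false]
          have hrec1 := ih (i + 1) (r - s[i.toNat]) memo (by omega) (by omega) (by omega) hg
          cases hres1 : pvF s fuel (i + 1) (r - s[i.toNat]) memo with
          | mk inc m1 =>
            rw [hres1] at hrec1
            obtain ⟨hinc, hg1⟩ := hrec1
            dsimp only at hinc hg1 ⊢
            cases inc with
            | some t =>
              have htne : t ≠ [] := get_subset_sum_ne_nil _ _ _ hinc.symm
              dsimp only
              rw [if_neg htne]
              have hval : get_subset_sum (s.drop i.toNat) r = some (s[i.toNat] :: t) := by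
                rw [hAx, ← hinc]
                simp [hxrb, htne]
              exact ⟨hval.symm, pvGood_insert s m1 i r (some (s[i.toNat] :: t)) hg1 hi0 hval.symm⟩
            | none =>
              dsimp only
              have hrec2 := ih (i + 1) r m1 (by omega) (by omega) (by omega) hg1
              have hval : get_subset_sum (s.drop i.toNat) r =
                  get_subset_sum (s.drop ((i + 1).toNat)) r := by
                rw [hAx, ← hinc]
                simp [hxrb]
              refine ⟨by rw [hval]; exact hrec2.1, ?_⟩
              exact pvGood_insert s _ i r _ hrec2.2 hi0 (hrec2.1.trans hval.symm)

-- ===== VERDICT (by name: the statement is the Claim_ definition above) =====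
theorem get_subset_sum_spec : Claim_equal_get_subset_sum := by
  intro s k _
  unfold Spec_get_subset_sum get_subset_sum_alt
  have h := pvF_correct s (s.length + 1) 0 k PySem.Dict.empty (le_refl 0) (by positivity)
    (by omega) (by intro i r v _ hv; rw [PySem.Dict.get?_empty] at hv; cases hv)
  rw [h.1]; simp
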